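-- pv_equiv track=rewrite | github.com/JohanJSijtsma/Crossword-Puzzle-Generator | wordutil.py | word_depth
-- ===== SOURCE A (Python) =====
-- CH_TURN = ','
--
-- def word_depth(word):
--     if word == "":
--         return None
--     count = -1
--     turned = False
--     for letter in word:
--         if letter == CH_TURN:
--             count = 0
--             turned = True
--             continue
--         if turned:
--             count -= 1
--         else:
--             count += 1
--     return count
-- ===== SOURCE B (Python) =====
-- def word_depth(word):
--     if word == "":
--         return None
--     i = word.rfind(',')
--     if i == -1:
--         return len(word) - 1
--     return -(len(word) - i - 1)
-- ===== Notes on version B (the rewrite author's own statement) =====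
-- stated objective: simpler
-- what changed: Replaces the letter-by-letter accumulator loop with a closed-form arithmetic expression over the index of the last comma found by str.rfind.
import Mathlib
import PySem

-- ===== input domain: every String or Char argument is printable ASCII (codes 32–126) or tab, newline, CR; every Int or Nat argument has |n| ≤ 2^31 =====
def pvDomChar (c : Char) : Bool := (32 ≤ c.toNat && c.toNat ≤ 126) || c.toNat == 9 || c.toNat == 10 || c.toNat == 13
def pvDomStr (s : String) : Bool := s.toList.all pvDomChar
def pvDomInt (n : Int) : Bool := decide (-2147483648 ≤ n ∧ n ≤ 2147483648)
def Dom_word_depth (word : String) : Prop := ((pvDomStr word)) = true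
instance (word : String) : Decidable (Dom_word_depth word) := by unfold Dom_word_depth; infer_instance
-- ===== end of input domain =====

-- B replaces A's per-letter accumulator with a closed-form expression over the last comma's index (simpler).

-- ===== PORT A =====
def word_depth (word : String) : Option Int :=
  if word = "" then none
  else
    let st := word.toList.foldl
      (fun (st : Int × Bool) letter =>
        if letter = ',' then (0, true)
        else if st.2 then (st.1 - 1, st.2) else (st.1 + 1, st.2))
      (-1, false)
    some st.1

-- ===== PORT B =====
-- hand port of word.rfind(','): index of the last ',' , or -1 (exact: scans the characters)
def rfindComma : List Char → Int
  | [] => -1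
  | c :: rest =>
    let r := rfindComma rest
    if r ≠ -1 then r + 1 else if c = ',' then 0 else -1

def word_depth_alt (word : String) : Option Int :=
  if word = "" then none
  else
    let n : Int := word.toList.length
    let i := rfindComma word.toList
    if i = -1 then some (n - 1) else some (-(n - i - 1))

-- ===== PRECONDITION & SPEC =====
def Spec_word_depth (word : String) (out : Option Int) : Prop := out = word_depth_alt word
instance (word : String) (out : Option Int) : Decidable (Spec_word_depth word out) := by unfold Spec_word_depth; infer_instance

-- ===== CLAIM (what is proved, stated in full; the proofs are below) =====
def Claim_equal_word_depth : Prop := ∀ (word : String), Dom_word_depth word → Spec_word_depth word (word_depth word)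

-- ===== LEMMAS AND PROOFS =====
theorem rfindComma_ge (cs : List Char) : -1 ≤ rfindComma cs := by
  induction cs with
  | nil => simp [rfindComma]
  | cons c rest ih =>
    simp only [rfindComma]
    split_ifs <;> omega

theorem fold_closed (cs : List Char) : ∀ (c0 : Int) (b : Bool),
    cs.foldl (fun (st : Int × Bool) letter =>
        if letter = ',' then (0, true)
        else if st.2 then (st.1 - 1, st.2) else (st.1 + 1, st.2)) (c0, b)
    = if rfindComma cs = -1 then
        ((if b then c0 - cs.length else c0 + cs.length), b)
      else (-((cs.length : Int) - rfindComma cs - 1), true) := by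
  induction cs with
  | nil => intro c0 b; cases b <;> simp [rfindComma]
  | cons c rest ih =>
    intro c0 b
    have hge := rfindComma_ge rest
    simp only [List.foldl_cons, rfindComma]
    by_cases hc : c = ','
    · rw [if_pos hc, ih]
      clear ih
      split_ifs <;>
        first
        | (exfalso; omega)
        | (simp only [Prod.mk.injEq, List.length_cons]
           exact ⟨by push_cast; omega, trivial⟩)
        | (exfalso; simp_all)
    · rw [if_neg hc]
      cases b <;> rw [ih] <;> clear ih <;>
        split_ifs <;>
        first
        | (exfalso; omega)
        | (simp only [Prod.mk.injEq, List.length_cons]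
           exact ⟨by push_cast; omega, trivial⟩)

-- ===== VERDICT (by name: the statement is the Claim_ definition above) =====
theorem word_depth_spec : Claim_equal_word_depth := by
  intro word _
  unfold Spec_word_depth word_depth word_depth_alt
  by_cases h : word = ""
  · simp [h]
  · simp only [if_neg h]
    rw [fold_closed]
    have hge := rfindComma_ge word.toList
    split_ifs <;> simp_all <;> omega
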